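-- pv_equiv track=rewrite | github.com/weston66/poker_stats | poker_build.py | count_suit_value
-- ===== SOURCE A (Python) =====
-- def count_suit_value(suit, value):
--     value_count = []
--     for n in set(value):
--         value_count.append(int(value.count(n)))
--
--     value_count_max = max(value_count)
--
--     suit_count = []
--     for m in set(suit):
--         suit_count.append(suit.count(m))
--
--     suit_count_max = max(suit_count)
--
--     return value_count_max, suit_count_max
-- ===== SOURCE B (Python) =====
-- def count_suit_value(suit, value):
--     # One pass per list: build a hash counter and track the running maximum
--     # count, instead of calling list.count once per distinct element.
--     def max_count(xs):
--         counts = {}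
--         best = None
--         for x in xs:
--             c = counts.get(x, 0) + 1
--             counts[x] = c
--             if best is None or best < c:
--                 best = c
--         if best is None:
--             raise ValueError("max() arg is an empty sequence")
--         return best
--     return max_count(value), max_count(suit)
-- ===== Notes on version B (the rewrite author's own statement) =====
-- stated objective: faster
-- what changed: Replaces the per-distinct-element list.count scans (and the final max over the count list) with a single pass per list that maintains a dict of running counts and the running maximum count.
import Mathlib
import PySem

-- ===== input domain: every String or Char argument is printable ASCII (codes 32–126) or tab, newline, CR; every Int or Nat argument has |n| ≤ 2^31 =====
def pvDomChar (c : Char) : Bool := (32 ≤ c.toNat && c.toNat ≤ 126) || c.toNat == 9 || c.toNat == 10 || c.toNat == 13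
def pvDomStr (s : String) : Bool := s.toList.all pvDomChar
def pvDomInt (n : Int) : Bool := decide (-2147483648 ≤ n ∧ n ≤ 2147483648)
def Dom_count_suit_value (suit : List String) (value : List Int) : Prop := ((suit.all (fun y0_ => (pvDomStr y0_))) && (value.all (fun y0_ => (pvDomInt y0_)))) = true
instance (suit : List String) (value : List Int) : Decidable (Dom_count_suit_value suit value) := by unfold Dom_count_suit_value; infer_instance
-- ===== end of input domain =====

-- B changes the algorithm: one pass per list with a dict of running counts and a running
-- maximum count, instead of a list.count scan per distinct element followed by max().

-- ===== PORT A =====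
-- A: for n in set(xs): append xs.count(n); then max of that list.  max([]) raises
-- ValueError (Pre_ excludes it); the .getD 0 is never reached under Pre_.
def count_suit_value (suit : List String) (value : List Int) : Int × Int :=
  let value_count : List Int :=
    (PySem.Set.ofList value).foldl (fun acc n => acc ++ [(value.count n : Int)]) []
  let value_count_max : Int := (PySem.List.max? value_count (fun y => y)).getD 0
  let suit_count : List Int :=
    (PySem.Set.ofList suit).foldl (fun acc m => acc ++ [(suit.count m : Int)]) []
  let suit_count_max : Int := (PySem.List.max? suit_count (fun y => y)).getD 0
  (value_count_max, suit_count_max)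

-- ===== PORT B =====
-- B's loop body: update the dict of counts and the running maximum.
def pvStep {α : Type} [BEq α] (p : PySem.Dict α Int × Option Int) (x : α) :
    PySem.Dict α Int × Option Int :=
  let c := p.1.getD x 0 + 1
  let counts := p.1.insert x c
  let best := match p.2 with
    | none => some c
    | some b => if b < c then some c else some b
  (counts, best)

-- B's helper: single pass; best = none ↔ the list was empty, where Python B raises
-- ValueError (excluded by Pre_), so the .getD 0 is never reached under Pre_.
def pvMaxCount {α : Type} [BEq α] (xs : List α) : Int :=
  ((xs.foldl pvStep (PySem.Dict.empty, (none : Option Int))).2).getD 0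

def count_suit_value_alt (suit : List String) (value : List Int) : Int × Int :=
  (pvMaxCount value, pvMaxCount suit)

-- ===== PRECONDITION & SPEC =====
-- Pre_ excludes exactly the inputs on which Python A raises ValueError (max() of an
-- empty sequence): an empty suit list or an empty value list.  Python B raises there too.
def Pre_count_suit_value (suit : List String) (value : List Int) : Prop :=
  suit ≠ [] ∧ value ≠ []
instance (suit : List String) (value : List Int) : Decidable (Pre_count_suit_value suit value) := by unfold Pre_count_suit_value; infer_instance

def pvWitness_count_suit_value : List String × List Int := (["h", "s", "h"], [2, 7, 2, 2])

def Spec_count_suit_value (suit : List String) (value : List Int) (out : Int × Int) : Prop := out = count_suit_value_alt suit value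
instance (suit : List String) (value : List Int) (out : Int × Int) : Decidable (Spec_count_suit_value suit value out) := by unfold Spec_count_suit_value; infer_instance

-- ===== CLAIM (what is proved, stated in full; the proofs are below) =====
def Claim_equal_count_suit_value : Prop := ∀ (suit : List String) (value : List Int), Dom_count_suit_value suit value → Pre_count_suit_value suit value → Spec_count_suit_value suit value (count_suit_value suit value)

-- ===== LEMMAS AND PROOFS =====

-- Invariant of B's fold: the dict is Counter(l); best is none iff l is empty, else
-- some m where m is an attained count in l and bounds every count in l.
theorem pvFold_invariant {α : Type} [BEq α] [LawfulBEq α] (l : List α) :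
    (l.foldl pvStep (PySem.Dict.empty, (none : Option Int))).1 = PySem.Dict.counter l ∧
    ((l = [] ∧ (l.foldl pvStep (PySem.Dict.empty, (none : Option Int))).2 = none) ∨
      (∃ m : Int, (l.foldl pvStep (PySem.Dict.empty, (none : Option Int))).2 = some m ∧
        (∃ v ∈ l, (l.count v : Int) = m) ∧ ∀ v ∈ l, (l.count v : Int) ≤ m)) := by
  induction l using List.reverseRecOn with
  | nil => exact ⟨rfl, Or.inl ⟨rfl, rfl⟩⟩
  | append_singleton l x ih =>
    obtain ⟨hd, hb⟩ := ih
    rw [List.foldl_append, List.foldl_cons, List.foldl_nil]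
    -- the dict component
    have hc : (l.foldl pvStep (PySem.Dict.empty, (none : Option Int))).1.getD x 0
        = (l.count x : Int) := by rw [hd, PySem.Dict.getD_counter]
    have hdict : (pvStep (l.foldl pvStep (PySem.Dict.empty, (none : Option Int))) x).1
        = PySem.Dict.counter (l ++ [x]) := by
      show (l.foldl pvStep (PySem.Dict.empty, (none : Option Int))).1.insert x
          ((l.foldl pvStep (PySem.Dict.empty, (none : Option Int))).1.getD x 0 + 1)
          = PySem.Dict.counter (l ++ [x])
      rw [hd, ← PySem.Dict.foldl_insert_getD_add_one_eq_counter,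
          ← PySem.Dict.foldl_insert_getD_add_one_eq_counter, List.foldl_append,
          List.foldl_cons, List.foldl_nil]
    refine ⟨hdict, Or.inr ?_⟩
    have hcount_ne : ∀ v : α, v ≠ x → (l ++ [x]).count v = l.count v := by
      intro v hv
      have hxv : ¬ x = v := fun h => hv h.symm
      simp [List.count_append, hxv]
    have hcount_x : ((l ++ [x]).count x : Int) = (l.count x : Int) + 1 := by
      simp [List.count_append]
    rcases hb with ⟨hnil, hnone⟩ | ⟨m, hm, ⟨v0, hv0, hv0c⟩, hbound⟩
    · subst hnil
      refine ⟨1, ?_, ⟨x, by simp, by simp⟩, ?_⟩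
      · simp [pvStep, PySem.Dict.getD_empty]
      · intro v hv
        simp only [List.nil_append, List.mem_singleton] at hv
        subst hv; simp
    · -- l nonempty, old best = some m
      have hstep2 : (pvStep (l.foldl pvStep (PySem.Dict.empty, (none : Option Int))) x).2
          = if m < (l.count x : Int) + 1 then some ((l.count x : Int) + 1) else some m := by
        show (match (l.foldl pvStep (PySem.Dict.empty, (none : Option Int))).2 with
          | none => some ((l.foldl pvStep (PySem.Dict.empty, (none : Option Int))).1.getD x 0 + 1)
          | some b => if b < (l.foldl pvStep (PySem.Dict.empty, (none : Option Int))).1.getD x 0 + 1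
              then some ((l.foldl pvStep (PySem.Dict.empty, (none : Option Int))).1.getD x 0 + 1)
              else some b) = _
        rw [hm, hc]
      by_cases hlt : m < (l.count x : Int) + 1
      · refine ⟨(l.count x : Int) + 1, by rw [hstep2, if_pos hlt], ⟨x, by simp, by rw [hcount_x]⟩, ?_⟩
        intro v hv
        by_cases hvx : v = x
        · subst hvx; rw [hcount_x]
        · rw [hcount_ne v hvx]
          rcases List.mem_append.mp hv with h | h
          · exact le_of_lt (lt_of_le_of_lt (hbound v h) hlt)
          · exact absurd (List.mem_singleton.mp h) hvx
      · have hv0x : v0 ≠ x := by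
          intro h
          subst h
          have := hbound v0 hv0
          omega
        refine ⟨m, by rw [hstep2, if_neg hlt], ⟨v0, by simp [hv0], ?_⟩, ?_⟩
        · rw [hcount_ne v0 hv0x] at *; exact hv0c
        · intro v hv
          by_cases hvx : v = x
          · subst hvx; rw [hcount_x]; omega
          · rw [hcount_ne v hvx]
            rcases List.mem_append.mp hv with h | h
            · exact hbound v h
            · exact absurd (List.mem_singleton.mp h) hvx

-- A value m attained in an Int list and bounding it IS the value of max?.
theorem pv_max?_eq_of_attained (xs : List Int) (m : Int) (hmem : m ∈ xs)
    (hbd : ∀ y ∈ xs, y ≤ m) : PySem.List.max? xs (fun y => y) = some m := by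
  cases hmax : PySem.List.max? xs (fun y => y) with
  | none =>
    rw [PySem.List.max?_eq_none_iff] at hmax
    subst hmax; simp at hmem
  | some m' =>
    have h1 : m' ∈ xs := PySem.List.max?_mem hmax
    have h2 := PySem.List.max?_isMax hmax
    have hle1 := h2 m hmem
    have hle2 := hbd m' h1
    simp only at hle1
    exact congrArg some (le_antisymm hle2 hle1)

-- The two per-list computations agree on a nonempty list.
theorem pv_per_list {α : Type} [BEq α] [LawfulBEq α] (xs : List α) (hne : xs ≠ []) :
    (PySem.List.max? ((PySem.Set.ofList xs).foldl
        (fun acc n => acc ++ [(xs.count n : Int)]) []) (fun y => y)).getD 0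
      = pvMaxCount xs := by
  obtain ⟨-, hb⟩ := pvFold_invariant xs
  rcases hb with ⟨h, -⟩ | ⟨m, hm, ⟨v, hv, hvc⟩, hbound⟩
  · exact absurd h hne
  · have hmap : (PySem.Set.ofList xs).foldl
        (fun acc n => acc ++ [(xs.count n : Int)]) []
        = (PySem.Set.ofList xs).map (fun n => (xs.count n : Int)) := by
      rw [PySem.List.foldl_append_singleton_eq_map]; rfl
    rw [hmap]
    have hmem : m ∈ (PySem.Set.ofList xs).map (fun n => (xs.count n : Int)) := by
      exact List.mem_map.mpr ⟨v, (PySem.Set.mem_ofList xs v).mpr hv, hvc⟩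
    have hbd : ∀ y ∈ (PySem.Set.ofList xs).map (fun n => (xs.count n : Int)), y ≤ m := by
      intro y hy
      obtain ⟨w, hw, rfl⟩ := List.mem_map.mp hy
      exact hbound w ((PySem.Set.mem_ofList xs w).mp hw)
    rw [pv_max?_eq_of_attained _ m hmem hbd]
    unfold pvMaxCount
    rw [hm]

-- ===== VERDICT (by name: the statement is the Claim_ definition above) =====
theorem count_suit_value_spec : Claim_equal_count_suit_value := by
  intro suit value _ hpre
  obtain ⟨hs, hv⟩ := hpre
  show count_suit_value suit value = count_suit_value_alt suit value
  show ((PySem.List.max? ((PySem.Set.ofList value).foldl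
      (fun acc n => acc ++ [(value.count n : Int)]) []) (fun y => y)).getD 0,
    (PySem.List.max? ((PySem.Set.ofList suit).foldl
      (fun acc m => acc ++ [(suit.count m : Int)]) []) (fun y => y)).getD 0)
      = (pvMaxCount value, pvMaxCount suit)
  rw [pv_per_list value hv, pv_per_list suit hs]
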